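-- pv_equiv track=rewrite | github.com/klaveflo/Airquality_Dashboard | test_live.py | render_legend
-- ===== SOURCE A (Python) =====
-- EAQI_THRESHOLDS = {
--     "PM2.5": [(15, "Good", "#79BC6A"), (35, "Fair", "#BBCF4C"), (75, "Moderate", "#EEC20B"),
--               (115, "Poor", "#F29305"), (150, "Very Poor", "#E8416F"), (float("inf"), "Extremely Poor", "#A50034")],
--     "PM10":  [(25, "Good", "#79BC6A"), (50, "Fair", "#BBCF4C"), (90, "Moderate", "#EEC20B"),
--               (180, "Poor", "#F29305"), (280, "Very Poor", "#E8416F"), (float("inf"), "Extremely Poor", "#A50034")],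
--     "NO2":   [(40, "Good", "#79BC6A"), (100, "Fair", "#BBCF4C"), (200, "Moderate", "#EEC20B"),
--               (400, "Poor", "#F29305"), (1000, "Very Poor", "#E8416F"), (float("inf"), "Extremely Poor", "#A50034")],
--     "O3":    [(60, "Good", "#79BC6A"), (120, "Fair", "#BBCF4C"), (180, "Moderate", "#EEC20B"),
--               (240, "Poor", "#F29305"), (320, "Very Poor", "#E8416F"), (float("inf"), "Extremely Poor", "#A50034")],
-- }
--
-- def render_legend(pollutant):
--     thresholds = EAQI_THRESHOLDS.get(pollutant, EAQI_THRESHOLDS["PM10"])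
--     prev, swatches = 0, []
--     for upper, label, colour in thresholds:
--         rng = f"{prev}–{upper}" if upper != float("inf") else f"{prev}+"
--         swatches.append(
--             f'<span style="background:{colour};color:#111;padding:2px 8px;'
--             f'border-radius:3px;font-size:11px;white-space:nowrap">'
--             f'{label}&nbsp;<span style="font-size:10px">{rng}</span></span>'
--         )
--         prev = upper if upper != float("inf") else prev
--     return (
--         '<div style="margin-top:8px;font-size:12px;color:#ccc;line-height:2.2">'
--         f'<b>{pollutant} Air Quality Index (µg/m³)</b><br>'
--         + " &thinsp;".join(swatches)
--         + '<br><span style="color:#aaa;font-size:11px">● Urban &nbsp;◆ Suburban &nbsp;▲ Rural</span>'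
--         + "</div>"
--     )
-- ===== SOURCE B (Python) =====
-- EAQI_THRESHOLDS = {
--     "PM2.5": [(15, "Good", "#79BC6A"), (35, "Fair", "#BBCF4C"), (75, "Moderate", "#EEC20B"),
--               (115, "Poor", "#F29305"), (150, "Very Poor", "#E8416F"), (float("inf"), "Extremely Poor", "#A50034")],
--     "PM10":  [(25, "Good", "#79BC6A"), (50, "Fair", "#BBCF4C"), (90, "Moderate", "#EEC20B"),
--               (180, "Poor", "#F29305"), (280, "Very Poor", "#E8416F"), (float("inf"), "Extremely Poor", "#A50034")],
--     "NO2":   [(40, "Good", "#79BC6A"), (100, "Fair", "#BBCF4C"), (200, "Moderate", "#EEC20B"),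
--               (400, "Poor", "#F29305"), (1000, "Very Poor", "#E8416F"), (float("inf"), "Extremely Poor", "#A50034")],
--     "O3":    [(60, "Good", "#79BC6A"), (120, "Fair", "#BBCF4C"), (180, "Moderate", "#EEC20B"),
--               (240, "Poor", "#F29305"), (320, "Very Poor", "#E8416F"), (float("inf"), "Extremely Poor", "#A50034")],
-- }
--
-- def _swatch(lo, up, label, colour):
--     rng = f"{lo}–{up}" if up != float("inf") else f"{lo}+"
--     return (f'<span style="background:{colour};color:#111;padding:2px 8px;'
--             f'border-radius:3px;font-size:11px;white-space:nowrap">'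
--             f'{label}&nbsp;<span style="font-size:10px">{rng}</span></span>')
--
-- def render_legend(pollutant):
--     thresholds = EAQI_THRESHOLDS.get(pollutant, EAQI_THRESHOLDS["PM10"])
--     lowers = [0] + [t[0] for t in thresholds[:-1]]
--     swatches = [_swatch(lo, up, label, colour)
--                 for lo, (up, label, colour) in zip(lowers, thresholds)]
--     return (
--         '<div style="margin-top:8px;font-size:12px;color:#ccc;line-height:2.2">'
--         f'<b>{pollutant} Air Quality Index (µg/m³)</b><br>'
--         + " &thinsp;".join(swatches)
--         + '<br><span style="color:#aaa;font-size:11px">● Urban &nbsp;◆ Suburban &nbsp;▲ Rural</span>'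
--         + "</div>"
--     )
-- ===== Notes on version B (the rewrite author's own statement) =====
-- stated objective: alternative
-- what changed: Replaces A's fold that threads a running `prev` lower bound with precomputed lower bounds ([0] + uppers of all but the last threshold) and a comprehension over zip(lowers, thresholds) using a swatch helper; identical HTML bytes.
import Mathlib
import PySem

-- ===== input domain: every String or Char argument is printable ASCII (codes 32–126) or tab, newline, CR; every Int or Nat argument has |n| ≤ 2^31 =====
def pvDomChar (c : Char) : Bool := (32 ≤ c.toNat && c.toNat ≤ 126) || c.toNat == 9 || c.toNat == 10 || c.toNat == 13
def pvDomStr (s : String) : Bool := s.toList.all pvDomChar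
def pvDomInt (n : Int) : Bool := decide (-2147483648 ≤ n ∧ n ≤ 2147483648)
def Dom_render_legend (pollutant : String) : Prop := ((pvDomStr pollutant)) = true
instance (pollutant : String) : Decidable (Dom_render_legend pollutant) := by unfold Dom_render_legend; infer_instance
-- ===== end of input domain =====

-- B replaces A's running-`prev` fold with precomputed lower bounds and a map over zip (alternative decomposition; same cost).
-- Thresholds are (Option Int, label, colour): `none` models Python's float('inf') upper bound (its only float use is `!= inf` and str()).

-- ===== PORT A =====
def thrPM25 : List (Option Int × String × String) :=
  [(some 15, "Good", "#79BC6A"), (some 35, "Fair", "#BBCF4C"), (some 75, "Moderate", "#EEC20B"),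
   (some 115, "Poor", "#F29305"), (some 150, "Very Poor", "#E8416F"), (none, "Extremely Poor", "#A50034")]
def thrPM10 : List (Option Int × String × String) :=
  [(some 25, "Good", "#79BC6A"), (some 50, "Fair", "#BBCF4C"), (some 90, "Moderate", "#EEC20B"),
   (some 180, "Poor", "#F29305"), (some 280, "Very Poor", "#E8416F"), (none, "Extremely Poor", "#A50034")]
def thrNO2 : List (Option Int × String × String) :=
  [(some 40, "Good", "#79BC6A"), (some 100, "Fair", "#BBCF4C"), (some 200, "Moderate", "#EEC20B"),
   (some 400, "Poor", "#F29305"), (some 1000, "Very Poor", "#E8416F"), (none, "Extremely Poor", "#A50034")]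
def thrO3 : List (Option Int × String × String) :=
  [(some 60, "Good", "#79BC6A"), (some 120, "Fair", "#BBCF4C"), (some 180, "Moderate", "#EEC20B"),
   (some 240, "Poor", "#F29305"), (some 320, "Very Poor", "#E8416F"), (none, "Extremely Poor", "#A50034")]

def EAQI_THRESHOLDS : PySem.Dict String (List (Option Int × String × String)) :=
  PySem.Dict.ofList [("PM2.5", thrPM25), ("PM10", thrPM10), ("NO2", thrNO2), ("O3", thrO3)]

-- the loop body of A, prev threaded through the fold; swatch string built exactly as A's f-string
def render_legend (pollutant : String) : String :=
  -- EAQI_THRESHOLDS.get(pollutant, EAQI_THRESHOLDS["PM10"]); the default dict["PM10"] is the constant thrPM10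
  let thresholds := EAQI_THRESHOLDS.getD pollutant thrPM10
  let st := thresholds.foldl (fun (st : Int × List String) t =>
    let prev := st.1
    let rng := match t.1 with
      | some u => PySem.Int.toStr prev ++ "–" ++ PySem.Int.toStr u
      | none => PySem.Int.toStr prev ++ "+"
    let sw := "<span style=\"background:" ++ t.2.2 ++ ";color:#111;padding:2px 8px;border-radius:3px;font-size:11px;white-space:nowrap\">"
      ++ t.2.1 ++ "&nbsp;<span style=\"font-size:10px\">" ++ rng ++ "</span></span>"
    ((match t.1 with | some u => u | none => prev), st.2 ++ [sw])) (0, [])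
  "<div style=\"margin-top:8px;font-size:12px;color:#ccc;line-height:2.2\">"
    ++ "<b>" ++ pollutant ++ " Air Quality Index (µg/m³)</b><br>"
    ++ PySem.Str.join " &thinsp;" st.2
    ++ "<br><span style=\"color:#aaa;font-size:11px\">● Urban &nbsp;◆ Suburban &nbsp;▲ Rural</span>"
    ++ "</div>"

-- ===== PORT B =====
-- str(lo) for a lower bound that is an int or float('inf'); "inf" is exactly Python's str(float('inf'))
def numStr (lo : Option Int) : String :=
  match lo with
  | some n => PySem.Int.toStr n
  | none => "inf"

def swatch_alt (lo : Option Int) (t : Option Int × String × String) : String :=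
  let rng := match t.1 with
    | some u => numStr lo ++ "–" ++ PySem.Int.toStr u
    | none => numStr lo ++ "+"
  "<span style=\"background:" ++ t.2.2 ++ ";color:#111;padding:2px 8px;border-radius:3px;font-size:11px;white-space:nowrap\">"
    ++ t.2.1 ++ "&nbsp;<span style=\"font-size:10px\">" ++ rng ++ "</span></span>"

def render_legend_alt (pollutant : String) : String :=
  let thresholds := EAQI_THRESHOLDS.getD pollutant thrPM10
  -- lowers = [0] + [t[0] for t in thresholds[:-1]]
  let lowers := (some (0 : Int)) :: (PySem.List.slice thresholds none (some (-1))).map (fun t => t.1)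
  let swatches := (lowers.zip thresholds).map (fun lt => swatch_alt lt.1 lt.2)
  "<div style=\"margin-top:8px;font-size:12px;color:#ccc;line-height:2.2\">"
    ++ "<b>" ++ pollutant ++ " Air Quality Index (µg/m³)</b><br>"
    ++ PySem.Str.join " &thinsp;" swatches
    ++ "<br><span style=\"color:#aaa;font-size:11px\">● Urban &nbsp;◆ Suburban &nbsp;▲ Rural</span>"
    ++ "</div>"

-- ===== PRECONDITION & SPEC =====
def Spec_render_legend (pollutant : String) (out : String) : Prop := out = render_legend_alt pollutant
instance (pollutant : String) (out : String) : Decidable (Spec_render_legend pollutant out) := by unfold Spec_render_legend; infer_instance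

-- ===== CLAIM (what is proved, stated in full; the proofs are below) =====
def Claim_equal_render_legend : Prop := ∀ (pollutant : String), Dom_render_legend pollutant → Spec_render_legend pollutant (render_legend pollutant)

-- ===== LEMMAS AND PROOFS =====
-- the looked-up thresholds list is always one of the four constants
theorem getD_cases (p : String) :
    EAQI_THRESHOLDS.getD p thrPM10 = thrPM25 ∨ EAQI_THRESHOLDS.getD p thrPM10 = thrPM10 ∨
    EAQI_THRESHOLDS.getD p thrPM10 = thrNO2 ∨ EAQI_THRESHOLDS.getD p thrPM10 = thrO3 := by
  have hmk : EAQI_THRESHOLDS = PySem.Dict.mk [("PM2.5", thrPM25), ("PM10", thrPM10), ("NO2", thrNO2), ("O3", thrO3)] := by decide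
  simp only [hmk, PySem.Dict.getD, PySem.Dict.get?_mk_cons]
  repeat' split
  all_goals simp_all [PySem.Dict.get?]

-- ===== VERDICT (by name: the statement is the Claim_ definition above) =====
theorem render_legend_spec : Claim_equal_render_legend := by
  intro p _
  show render_legend p = render_legend_alt p
  unfold render_legend render_legend_alt
  rcases getD_cases p with h | h | h | h <;> rw [h] <;> rfl
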